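-- pv_equiv track=rewrite | github.com/chesswiz16/TopCoder | SRM223_quiz_show.py | quiz_show
-- ===== SOURCE A (Python) =====
-- def quiz_show(scores, wager_1, wager_2):
--     """
--
--     :rtype : int
--     """
--     my_score = scores[0]
--     score_1 = scores[1]
--     score_2 = scores[2]
--     bet = 0
--     best = 0
--     for wager in range(0, my_score + 1):
--         wins = 0
--         for i_am_right in [-1, 1]:
--             for one_is_right in [-1, 1]:
--                 for two_is_right in [-1, 1]:
--                     my_modified_score = my_score + (i_am_right * wager)
--                     if (my_modified_score > score_1 + one_is_right * wager_1 and
--                                 my_modified_score > score_2 + two_is_right * wager_2):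
--                         wins += 1
--         if wins > best:
--             bet = wager
--             best = wins
--     return bet
-- ===== SOURCE B (Python) =====
-- def quiz_show(scores, wager_1, wager_2):
--     my_score = scores[0]
--     score_1 = scores[1]
--     score_2 = scores[2]
--     # For each of the 4 opponent sign combos, "I am right" wins iff wager >= lo,
--     # and "I am wrong" wins iff wager <= hi.
--     los = [max(score_1 + o1 * wager_1, score_2 + o2 * wager_2) - my_score + 1
--            for o1 in (-1, 1) for o2 in (-1, 1)]
--     his = [my_score - max(score_1 + o1 * wager_1, score_2 + o2 * wager_2) - 1
--            for o1 in (-1, 1) for o2 in (-1, 1)]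
--
--     def wins(w):
--         return sum(1 for lo in los if lo <= w) + sum(1 for hi in his if w <= hi)
--
--     # wins only increases at the lo breakpoints, so the first maximizer is 0 or a lo.
--     cands = sorted(set(c for c in [0] + los if 0 <= c <= my_score))
--     bet = 0
--     best = 0
--     for w in cands:
--         v = wins(w)
--         if v > best:
--             bet = w
--             best = v
--     return bet
-- ===== Notes on version B (the rewrite author's own statement) =====
-- stated objective: faster
-- what changed: Instead of trying every wager from 0 to my_score and re-counting the 8 sign combinations for each, B computes each combination's winning wager interval in closed form and scans only the O(1) interval breakpoints (the lower endpoints plus 0), since the win count can only increase at those points.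
import Mathlib
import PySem

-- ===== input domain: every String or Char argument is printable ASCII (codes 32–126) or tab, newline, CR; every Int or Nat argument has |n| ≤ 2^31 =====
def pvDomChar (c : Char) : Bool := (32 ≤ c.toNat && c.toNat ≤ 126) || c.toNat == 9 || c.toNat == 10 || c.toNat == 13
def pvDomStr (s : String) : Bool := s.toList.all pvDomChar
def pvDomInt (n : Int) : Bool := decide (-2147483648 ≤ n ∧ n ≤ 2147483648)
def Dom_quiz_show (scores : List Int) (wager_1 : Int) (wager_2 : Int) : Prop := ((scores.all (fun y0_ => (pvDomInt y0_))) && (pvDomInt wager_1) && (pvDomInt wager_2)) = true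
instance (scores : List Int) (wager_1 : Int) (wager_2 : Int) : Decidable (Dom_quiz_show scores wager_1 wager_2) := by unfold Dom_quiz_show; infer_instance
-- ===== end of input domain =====

-- B replaces A's scan of every wager in [0, my_score] by computing each sign-combination's
-- winning wager interval in closed form and scanning only the interval breakpoints (objective: faster).

-- ===== PORT A =====
def quiz_show (scores : List Int) (wager_1 : Int) (wager_2 : Int) : Int :=
  match PySem.List.pyGet? scores 0, PySem.List.pyGet? scores 1, PySem.List.pyGet? scores 2 with
  | some my_score, some score_1, some score_2 =>
      ((PySem.List.pyRange 0 (my_score + 1) 1).foldl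
        (fun (s : Int × Int) wager =>
          let wins : Int :=
            ([(-1 : Int), 1]).foldl (fun acc i_am_right =>
              ([(-1 : Int), 1]).foldl (fun acc one_is_right =>
                ([(-1 : Int), 1]).foldl (fun acc two_is_right =>
                  let my_modified_score := my_score + i_am_right * wager
                  if my_modified_score > score_1 + one_is_right * wager_1 ∧
                     my_modified_score > score_2 + two_is_right * wager_2
                  then acc + 1 else acc) acc) acc) 0
          if wins > s.2 then (wager, wins) else s)
        (0, 0)).1
  | _, _, _ => 0   -- IndexError in Python: excluded by Pre_quiz_show

-- ===== PORT B =====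
def quiz_show_alt (scores : List Int) (wager_1 : Int) (wager_2 : Int) : Int :=
  match PySem.List.pyGet? scores 0 with
  | none => 0   -- IndexError in Python: excluded by Pre_quiz_show
  | some my_score =>
  match PySem.List.pyGet? scores 1 with
  | none => 0
  | some score_1 =>
  match PySem.List.pyGet? scores 2 with
  | none => 0
  | some score_2 =>
      let combos : List (Int × Int) := [(-1, -1), (-1, 1), (1, -1), (1, 1)]
      let los := combos.map (fun p =>
        max (score_1 + p.1 * wager_1) (score_2 + p.2 * wager_2) - my_score + 1)
      let his := combos.map (fun p =>
        my_score - max (score_1 + p.1 * wager_1) (score_2 + p.2 * wager_2) - 1)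
      let wins : Int → Int := fun w =>
        los.foldl (fun acc lo => if lo ≤ w then acc + 1 else acc) 0 +
        his.foldl (fun acc hi => if w ≤ hi then acc + 1 else acc) 0
      let cands := PySem.List.sorted
        (PySem.Set.ofList ((0 :: los).filter (fun c => decide (0 ≤ c ∧ c ≤ my_score))))
        (fun x => x) false
      (cands.foldl (fun (s : Int × Int) w =>
          let v := wins w
          if v > s.2 then (w, v) else s) (0, 0)).1

-- ===== PRECONDITION & SPEC =====
-- A raises IndexError when scores has fewer than 3 elements; exactly those inputs are excluded.
def Pre_quiz_show (scores : List Int) (wager_1 : Int) (wager_2 : Int) : Prop :=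
  3 ≤ scores.length
instance (scores : List Int) (wager_1 : Int) (wager_2 : Int) : Decidable (Pre_quiz_show scores wager_1 wager_2) := by unfold Pre_quiz_show; infer_instance
def pvWitness_quiz_show : List Int × Int × Int := ([5, 3, 4], 2, 1)

def Spec_quiz_show (scores : List Int) (wager_1 : Int) (wager_2 : Int) (out : Int) : Prop := out = quiz_show_alt scores wager_1 wager_2
instance (scores : List Int) (wager_1 : Int) (wager_2 : Int) (out : Int) : Decidable (Spec_quiz_show scores wager_1 wager_2 out) := by unfold Spec_quiz_show; infer_instance

-- ===== CLAIM (what is proved, stated in full; the proofs are below) =====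
def Claim_equal_quiz_show : Prop := ∀ (scores : List Int) (wager_1 : Int) (wager_2 : Int), Dom_quiz_show scores wager_1 wager_2 → Pre_quiz_show scores wager_1 wager_2 → Spec_quiz_show scores wager_1 wager_2 (quiz_show scores wager_1 wager_2)

-- ===== LEMMAS AND PROOFS =====

-- the common loop step: record wager w if f w strictly beats the best so far
def pvStep (f : Int → Int) (s : Int × Int) (w : Int) : Int × Int :=
  if f w > s.2 then (w, f w) else s

theorem pvFoldl_step_congr (f g : Int → Int) (h : ∀ w, f w = g w) :
    ∀ (L : List Int) (s : Int × Int), L.foldl (pvStep f) s = L.foldl (pvStep g) s := by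
  intro L
  induction L with
  | nil => intro s; rfl
  | cons x t ih =>
      intro s
      simp only [List.foldl_cons, pvStep, h x]
      exact ih _

theorem pvFilter_eq_single {C : List Int} (hp : C.Pairwise (· < ·)) {x : Int} (hx : x ∈ C) :
    C.filter (fun c => decide (c = x)) = [x] := by
  induction C with
  | nil => cases hx
  | cons a t ih =>
      rcases List.pairwise_cons.mp hp with ⟨ha, ht⟩
      by_cases hax : a = x
      · subst hax
        have hnil : t.filter (fun c => decide (c = a)) = [] := by
          apply List.filter_eq_nil_iff.mpr
          intro c hc
          have := ha c hc
          simp; omega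
        simp [hnil]
      · have hx' : x ∈ t := by
          rcases List.mem_cons.mp hx with h | h
          · exact absurd h.symm hax
          · exact h
        simp [hax, ih ht hx']

theorem pvFilter_le_split {C : List Int} (hp : C.Pairwise (· < ·)) (k : Int) :
    C.filter (fun c => decide (c ≤ k + 1)) =
      C.filter (fun c => decide (c ≤ k)) ++ C.filter (fun c => decide (c = k + 1)) := by
  induction C with
  | nil => rfl
  | cons a t ih =>
      rcases List.pairwise_cons.mp hp with ⟨ha, ht⟩
      by_cases h1 : a ≤ k
      · have h2 : a ≤ k + 1 := by omega
        have h3 : ¬ (a = k + 1) := by omega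
        simp [h1, h2, h3, ih ht]
      · by_cases h4 : a = k + 1
        · subst h4
          have hnil : ∀ (p : Int → Bool), (∀ c, k + 1 < c → p c = false) →
              t.filter p = [] := by
            intro p hpf
            apply List.filter_eq_nil_iff.mpr
            intro c hc
            simp [hpf c (ha c hc)]
          rw [List.filter_cons, List.filter_cons, List.filter_cons,
              hnil (fun c => decide (c ≤ k + 1)) (by intro c hc; simp; omega),
              hnil (fun c => decide (c ≤ k)) (by intro c hc; simp; omega),
              hnil (fun c => decide (c = k + 1)) (by intro c hc; simp; omega)]
          simp [h1]
        · have h5 : ¬ (a ≤ k + 1) := by omega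
          simp [h1, h4, h5, ih ht]

-- the main fold-compression lemma: scanning [0..n] equals scanning only the candidates
theorem pvMain_fold (f : Int → Int) (C : List Int)
    (hp : C.Pairwise (· < ·)) (h0 : (0 : Int) ∈ C) (hnn : ∀ c ∈ C, 0 ≤ c) :
    ∀ n : Nat,
      (∀ w : Int, 1 ≤ w → w ≤ (n : Int) → w ∉ C → f w ≤ f (w - 1)) →
      (PySem.List.pyRange 0 ((n : Int) + 1) 1).foldl (pvStep f) (0, 0) =
        (C.filter (fun c => decide (c ≤ (n : Int)))).foldl (pvStep f) (0, 0) ∧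
      f (n : Int) ≤ ((PySem.List.pyRange 0 ((n : Int) + 1) 1).foldl (pvStep f) (0, 0)).2 := by
  intro n
  induction n with
  | zero =>
      intro _
      simp only [Nat.cast_zero]
      have hr : PySem.List.pyRange 0 ((0 : Int) + 1) 1 = [(0 : Int)] := by
        simpa using PySem.List.pyRange_one_singleton (a := (0 : Int))
      have hfil : C.filter (fun c => decide (c ≤ (0 : Int))) = [0] := by
        have : C.filter (fun c => decide (c ≤ (0 : Int))) =
            C.filter (fun c => decide (c = (0 : Int))) := by
          apply List.filter_congr
          intro c hc
          have := hnn c hc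
          simp; omega
        rw [this]
        exact pvFilter_eq_single hp h0
      constructor
      · rw [hr, hfil]
      · rw [hr]
        simp only [List.foldl_cons, List.foldl_nil, pvStep]
        split_ifs with h
        · exact le_rfl
        · exact not_lt.mp h
  | succ n ih =>
      intro hdrop
      have hdrop' : ∀ w : Int, 1 ≤ w → w ≤ (n : Int) → w ∉ C → f w ≤ f (w - 1) := by
        intro w h1 h2 h3
        exact hdrop w h1 (by push_cast; omega) h3
      obtain ⟨ihEq, ihInv⟩ := ih hdrop'
      have hsplit : PySem.List.pyRange 0 ((↑(n + 1) : Int) + 1) 1 =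
          PySem.List.pyRange 0 ((n : Int) + 1) 1 ++ [((n : Int) + 1)] := by
        have : ((↑(n + 1) : Int) + 1) = ((n : Int) + 1) + 1 := by push_cast; ring
        rw [this]
        exact PySem.List.pyRange_one_succ_right (by positivity)
      have hcast : ((n : Int) + 1) = ((↑(n + 1) : Int)) := by push_cast; ring
      set s := (PySem.List.pyRange 0 ((n : Int) + 1) 1).foldl (pvStep f) (0, 0) with hs
      have hLHS : (PySem.List.pyRange 0 ((↑(n + 1) : Int) + 1) 1).foldl (pvStep f) (0, 0) =
          pvStep f s ((n : Int) + 1) := by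
        rw [hsplit, List.foldl_append]
        rfl
      have hfsplit := pvFilter_le_split hp (k := (n : Int))
      by_cases hc : ((n : Int) + 1) ∈ C
      · have hone : C.filter (fun c => decide (c = (n : Int) + 1)) = [(n : Int) + 1] :=
          pvFilter_eq_single hp hc
        constructor
        · rw [hLHS]
          rw [show (fun c => decide (c ≤ (↑(n + 1) : Int))) =
                (fun c => decide (c ≤ (n : Int) + 1)) from by funext c; rw [hcast]]
          rw [hfsplit, hone, List.foldl_append, ← ihEq]
          rfl
        · rw [hLHS, ← hcast]
          simp only [pvStep]
          split_ifs with h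
          · exact le_rfl
          · exact not_lt.mp h
      · have hnone : C.filter (fun c => decide (c = (n : Int) + 1)) = [] := by
          apply List.filter_eq_nil_iff.mpr
          intro c hcm
          simp
          intro h; exact hc (h ▸ hcm)
        have hle : f ((n : Int) + 1) ≤ s.2 := by
          have h1 : f ((n : Int) + 1) ≤ f ((n : Int) + 1 - 1) := by
            apply hdrop ((n : Int) + 1) (by omega) (by push_cast; omega) hc
          have h2 : ((n : Int) + 1 - 1) = (n : Int) := by ring
          rw [h2] at h1
          exact le_trans h1 ihInv
        have hstep : pvStep f s ((n : Int) + 1) = s := by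
          simp only [pvStep]
          rw [if_neg (by omega)]
        constructor
        · rw [hLHS, hstep]
          rw [show (fun c => decide (c ≤ (↑(n + 1) : Int))) =
                (fun c => decide (c ≤ (n : Int) + 1)) from by funext c; rw [hcast]]
          rw [hfsplit, hnone, List.append_nil]
          exact ihEq
        · rw [hLHS, hstep, ← hcast]
          exact hle

-- accumulate-then-test as indicator sums
theorem pvAcc_ite (c : Prop) [Decidable c] (a : Int) :
    (if c then a + 1 else a) = a + (if c then 1 else 0) := by
  split_ifs <;> ring

-- A's inner triple loop over the 8 sign combinations
def pvWinsA (my s1 s2 w1 w2 w : Int) : Int :=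
  ([(-1 : Int), 1]).foldl (fun acc i =>
    ([(-1 : Int), 1]).foldl (fun acc o1 =>
      ([(-1 : Int), 1]).foldl (fun acc o2 =>
        let m := my + i * w
        if m > s1 + o1 * w1 ∧ m > s2 + o2 * w2 then acc + 1 else acc) acc) acc) 0

def pvCombos : List (Int × Int) := [(-1, -1), (-1, 1), (1, -1), (1, 1)]
def pvLos (my s1 s2 w1 w2 : Int) : List Int :=
  pvCombos.map (fun p => max (s1 + p.1 * w1) (s2 + p.2 * w2) - my + 1)
def pvHis (my s1 s2 w1 w2 : Int) : List Int :=
  pvCombos.map (fun p => my - max (s1 + p.1 * w1) (s2 + p.2 * w2) - 1)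

-- B's interval-based win count and its breakpoint candidates
def pvWinsB (my s1 s2 w1 w2 w : Int) : Int :=
  (pvLos my s1 s2 w1 w2).foldl (fun acc lo => if lo ≤ w then acc + 1 else acc) 0 +
  (pvHis my s1 s2 w1 w2).foldl (fun acc hi => if w ≤ hi then acc + 1 else acc) 0
def pvCands (my s1 s2 w1 w2 : Int) : List Int :=
  PySem.List.sorted
    (PySem.Set.ofList ((0 :: pvLos my s1 s2 w1 w2).filter (fun c => decide (0 ≤ c ∧ c ≤ my))))
    (fun x => x) false

theorem pvUp_atom (a b my w : Int) :
    (if max a b - my + 1 ≤ w then (1 : Int) else 0) =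
      (if my + 1 * w > a ∧ my + 1 * w > b then (1 : Int) else 0) := by
  split_ifs <;> omega

theorem pvDown_atom (a b my w : Int) :
    (if w ≤ my - max a b - 1 then (1 : Int) else 0) =
      (if my + -1 * w > a ∧ my + -1 * w > b then (1 : Int) else 0) := by
  split_ifs <;> omega

-- the 8-combination count of A equals B's interval count, pointwise
theorem pvWins_eq (my s1 s2 w1 w2 w : Int) :
    pvWinsA my s1 s2 w1 w2 w = pvWinsB my s1 s2 w1 w2 w := by
  simp only [pvWinsA, pvWinsB, pvLos, pvHis, pvCombos, List.map, List.foldl, pvAcc_ite]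
  rw [pvUp_atom, pvUp_atom, pvUp_atom, pvUp_atom,
      pvDown_atom, pvDown_atom, pvDown_atom, pvDown_atom]
  ring

-- off the lo breakpoints the win count cannot increase
theorem pvWinsB_drop (my s1 s2 w1 w2 w : Int) (h : w ∉ pvLos my s1 s2 w1 w2) :
    pvWinsB my s1 s2 w1 w2 w ≤ pvWinsB my s1 s2 w1 w2 (w - 1) := by
  simp only [pvLos, pvCombos, List.map, List.mem_cons, not_or, List.not_mem_nil] at h
  obtain ⟨h1, h2, h3, h4, -⟩ := h
  simp only [pvWinsB, pvLos, pvHis, pvCombos, List.map, List.foldl, pvAcc_ite]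
  gcongr <;> split_ifs <;> omega

theorem pvMem_cands (my s1 s2 w1 w2 x : Int) :
    x ∈ pvCands my s1 s2 w1 w2 ↔ (x ∈ (0 :: pvLos my s1 s2 w1 w2) ∧ 0 ≤ x ∧ x ≤ my) := by
  unfold pvCands
  rw [PySem.List.mem_sorted, PySem.Set.mem_ofList, List.mem_filter]
  simp

theorem pvCands_pairwise (my s1 s2 w1 w2 : Int) :
    (pvCands my s1 s2 w1 w2).Pairwise (· < ·) :=
  PySem.List.sorted_ofList_pairwise_lt _

theorem quiz_show_cons (a b c : Int) (t : List Int) (w1 w2 : Int) :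
    quiz_show (a :: b :: c :: t) w1 w2 =
      ((PySem.List.pyRange 0 (a + 1) 1).foldl (pvStep (pvWinsA a b c w1 w2)) (0, 0)).1 := by
  unfold quiz_show
  rw [show PySem.List.pyGet? (a :: b :: c :: t) 0 = some a from by simp [pysem],
      show PySem.List.pyGet? (a :: b :: c :: t) 1 = some b from by simp [pysem],
      show PySem.List.pyGet? (a :: b :: c :: t) 2 = some c from by simp [pysem]]
  rfl

theorem quiz_show_alt_cons (a b c : Int) (t : List Int) (w1 w2 : Int) :
    quiz_show_alt (a :: b :: c :: t) w1 w2 =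
      ((pvCands a b c w1 w2).foldl (pvStep (pvWinsB a b c w1 w2)) (0, 0)).1 := by
  unfold quiz_show_alt
  rw [show PySem.List.pyGet? (a :: b :: c :: t) 0 = some a from by simp [pysem],
      show PySem.List.pyGet? (a :: b :: c :: t) 1 = some b from by simp [pysem],
      show PySem.List.pyGet? (a :: b :: c :: t) 2 = some c from by simp [pysem]]
  rfl

theorem quiz_show_body_eq (scores : List Int) (wager_1 wager_2 : Int)
    (hpre : 3 ≤ scores.length) :
    quiz_show scores wager_1 wager_2 = quiz_show_alt scores wager_1 wager_2 := by
  rcases scores with _ | ⟨a, _ | ⟨b, _ | ⟨c, t⟩⟩⟩ <;> try simp at hpre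
  rw [quiz_show_cons, quiz_show_alt_cons]
  by_cases hmy : 0 ≤ a
  · have hp := pvCands_pairwise a b c wager_1 wager_2
    have h0 : (0 : Int) ∈ pvCands a b c wager_1 wager_2 :=
      (pvMem_cands a b c wager_1 wager_2 0).mpr ⟨List.mem_cons_self, le_refl 0, hmy⟩
    have hnn : ∀ x ∈ pvCands a b c wager_1 wager_2, (0 : Int) ≤ x :=
      fun x hx => ((pvMem_cands a b c wager_1 wager_2 x).mp hx).2.1
    have hub : ∀ x ∈ pvCands a b c wager_1 wager_2, x ≤ a :=
      fun x hx => ((pvMem_cands a b c wager_1 wager_2 x).mp hx).2.2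
    have hcast : ((a.toNat : Nat) : Int) = a := Int.toNat_of_nonneg hmy
    have hdrop : ∀ w : Int, 1 ≤ w → w ≤ ((a.toNat : Nat) : Int) →
        w ∉ pvCands a b c wager_1 wager_2 →
        pvWinsB a b c wager_1 wager_2 w ≤ pvWinsB a b c wager_1 wager_2 (w - 1) := by
      intro w h1 h2 h3
      rw [hcast] at h2
      apply pvWinsB_drop
      intro hmem
      exact h3 ((pvMem_cands a b c wager_1 wager_2 w).mpr
        ⟨List.mem_cons_of_mem _ hmem, by omega, h2⟩)
    obtain ⟨hEq, -⟩ := pvMain_fold (pvWinsB a b c wager_1 wager_2)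
      (pvCands a b c wager_1 wager_2) hp h0 hnn a.toNat hdrop
    rw [hcast] at hEq
    rw [List.filter_eq_self.mpr (fun x hx => decide_eq_true (hub x hx))] at hEq
    rw [pvFoldl_step_congr (pvWinsA a b c wager_1 wager_2) (pvWinsB a b c wager_1 wager_2)
      (pvWins_eq a b c wager_1 wager_2), hEq]
  · rw [PySem.List.pyRange_one_eq_nil (by omega)]
    have hnil : (0 :: pvLos a b c wager_1 wager_2).filter
        (fun x => decide (0 ≤ x ∧ x ≤ a)) = [] :=
      List.filter_eq_nil_iff.mpr (fun x _ => by simp; omega)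
    unfold pvCands
    rw [hnil]
    rfl

-- ===== VERDICT (by name: the statement is the Claim_ definition above) =====
theorem quiz_show_spec : Claim_equal_quiz_show := by
  intro scores w1 w2 _ hpre
  unfold Spec_quiz_show
  exact quiz_show_body_eq scores w1 w2 hpre
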